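-- pv_equiv track=rewrite | github.com/badmagick329/RbbBot | rbb_bot/memegifs/memegen.py | text_to_words
-- ===== SOURCE A (Python) =====
-- def text_to_words(text: str, max_word: int) -> list[str]:
--     words = list()
--     for w in text.split():
--         if len(w) > max_word:
--             words.extend(split_word(w, max_word))
--             continue
--         words.append(w)
--     return words
--
-- def split_word(word: str, max_word: int) -> list[str]:
--     words = list()
--     if len(word) > max_word:
--         last_word = word
--         while len(last_word) > max_word:
--             words.append(last_word[:max_word])
--             last_word = last_word[max_word:]
--         if last_word != "":
--             words.append(last_word)
--     return words
-- ===== SOURCE B (Python) =====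
-- def text_to_words(text: str, max_word: int) -> list[str]:
--     words = []
--     for w in text.split():
--         for i in range(0, len(w), max_word):
--             words.append(w[i:i + max_word])
--     return words
-- ===== Notes on version B (the rewrite author's own statement) =====
-- stated objective: simpler
-- what changed: Replaces the split_word helper (a while loop slicing off prefixes, plus a length guard and a trailing-remainder check) with a single nested loop that slices each word at stride max_word via range(0, len(w), max_word), which handles short and long words uniformly.
import Mathlib
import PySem

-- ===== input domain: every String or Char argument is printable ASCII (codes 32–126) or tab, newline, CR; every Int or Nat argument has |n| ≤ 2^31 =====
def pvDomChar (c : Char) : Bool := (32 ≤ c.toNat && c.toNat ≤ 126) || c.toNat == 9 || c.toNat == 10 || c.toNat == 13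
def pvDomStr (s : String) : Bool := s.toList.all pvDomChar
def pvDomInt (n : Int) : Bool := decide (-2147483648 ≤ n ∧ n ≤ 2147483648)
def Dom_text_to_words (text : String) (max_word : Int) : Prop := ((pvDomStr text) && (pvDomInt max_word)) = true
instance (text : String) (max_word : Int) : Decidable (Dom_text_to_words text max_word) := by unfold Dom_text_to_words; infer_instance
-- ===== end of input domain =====

-- B replaces A's split_word helper (while loop + length guard + remainder check) with one
-- nested strided-slice loop; same return value on all inputs where A returns (objective: simpler).

-- ===== PORT A =====
-- the 'while len(last_word) > max_word' loop of split_word; the '0 < m' conjunct is a pure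
-- termination guard (Python diverges when max_word ≤ 0 and the loop is entered; Pre_ excludes that)
def pvSplitLoop (last : List Char) (m : Int) : List (List Char) :=
  if h : m < (last.length : Int) ∧ 0 < m then
    PySem.List.slice last none (some m) ::
      pvSplitLoop (PySem.List.slice last (some m) none) m
  else
    -- loop exited: 'if last_word != "": words.append(last_word)'
    if last ≠ [] then [last] else []
termination_by last.length
decreasing_by
  rw [PySem.List.slice_from last (le_of_lt h.2)]
  simp only [List.length_drop]
  omega

-- split_word(word, max_word)
def pvSplitWord (word : List Char) (m : Int) : List (List Char) :=
  if m < (word.length : Int) then pvSplitLoop word m else []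

def text_to_words (text : String) (max_word : Int) : List String :=
  ((PySem.Chars.split₀ text.toList).foldl
    (fun acc w =>
      if max_word < (w.length : Int) then acc ++ pvSplitWord w max_word
      else acc ++ [w]) []).map String.ofList

-- ===== PORT B =====
def text_to_words_alt (text : String) (max_word : Int) : List String :=
  ((PySem.Chars.split₀ text.toList).foldl
    (fun acc w =>
      acc ++ (PySem.List.pyRange 0 (w.length : Int) max_word).map
        (fun i => PySem.List.slice w (some i) (some (i + max_word)))) []).map String.ofList

-- ===== PRECONDITION & SPEC =====
-- Pre_ excludes only max_word ≤ 0 on text containing at least one word: there A's while loop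
-- never terminates (it raises nothing and returns nothing), so A returns on every Pre_ input.
def Pre_text_to_words (text : String) (max_word : Int) : Prop :=
  1 ≤ max_word ∨ PySem.Str.split₀ text = []
instance (text : String) (max_word : Int) : Decidable (Pre_text_to_words text max_word) := by
  unfold Pre_text_to_words; infer_instance

def pvWitness_text_to_words : String × Int := ("chunk this longword", 4)

def Spec_text_to_words (text : String) (max_word : Int) (out : List String) : Prop := out = text_to_words_alt text max_word
instance (text : String) (max_word : Int) (out : List String) : Decidable (Spec_text_to_words text max_word out) := by unfold Spec_text_to_words; infer_instance

-- ===== CLAIM (what is proved, stated in full; the proofs are below) =====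
def Claim_equal_text_to_words : Prop := ∀ (text : String) (max_word : Int), Dom_text_to_words text max_word → Pre_text_to_words text max_word → Spec_text_to_words text max_word (text_to_words text max_word)

-- ===== LEMMAS AND PROOFS =====

-- no element of Python's str.split() is empty
theorem pvSplit₀_go_ne_nil (s cur : List Char) (acc : List (List Char))
    (hacc : ∀ w ∈ acc, w ≠ []) : ∀ w ∈ PySem.Chars.split₀.go s cur acc, w ≠ [] := by
  induction s generalizing cur acc with
  | nil =>
    intro w hw
    unfold PySem.Chars.split₀.go at hw
    by_cases hce : cur.isEmpty
    · rw [if_pos hce] at hw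
      exact hacc w (List.mem_reverse.mp hw)
    · rw [if_neg hce] at hw
      rcases List.mem_cons.mp (List.mem_reverse.mp hw) with h | h
      · subst h; simpa using List.isEmpty_eq_false_iff.mp (Bool.not_eq_true _ ▸ hce)
      · exact hacc w h

  | cons c rest ih =>
    intro w hw
    unfold PySem.Chars.split₀.go at hw
    by_cases hsp : PySem.Chars.isspace c
    · rw [if_pos hsp] at hw
      by_cases hce : cur.isEmpty
      · rw [if_pos hce] at hw
        exact ih [] acc hacc w hw
      · rw [if_neg hce] at hw
        refine ih [] (cur.reverse :: acc) ?_ w hw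
        intro v hv
        rcases List.mem_cons.mp hv with h | h
        · subst h; simpa using List.isEmpty_eq_false_iff.mp (Bool.not_eq_true _ ▸ hce)
        · exact hacc v h
    · rw [if_neg hsp] at hw
      exact ih (c :: cur) acc hacc w hw

theorem pvSplit₀_ne_nil (s : List Char) : ∀ w ∈ PySem.Chars.split₀ s, w ≠ [] :=
  pvSplit₀_go_ne_nil s [] [] (by simp)

-- range(0, n, m) for 0 < m < n starts with 0 and shifts by m
theorem pvRange_shift (n m : Int) (hm : 0 < m) (hn : m < n) :
    PySem.List.pyRange 0 n m = 0 :: (PySem.List.pyRange 0 (n - m) m).map (· + m) := by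
  rw [PySem.List.pyRange_of_pos 0 n hm, PySem.List.pyRange_of_pos 0 (n - m) hm]
  have h1 : (0:Int) < n := by omega
  have h2 : (0:Int) < n - m := by omega
  simp only [if_pos h1, if_pos h2, sub_zero]
  have key : (n + m - 1) / m = (n - m + m - 1) / m + 1 := by
    have : n + m - 1 = (n - m + m - 1) + 1 * m := by ring
    rw [this, Int.add_mul_ediv_right _ _ (by omega : m ≠ 0)]
  have hpos : 0 < (n - m + m - 1) / m + 1 := by
    have : (0:Int) ≤ (n - m + m - 1) / m := Int.ediv_nonneg (by omega) (by omega)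
    omega
  rw [key]
  have htn : ((n - m + m - 1) / m + 1).toNat = ((n - m + m - 1) / m).toNat + 1 := by omega
  rw [htn, List.range_succ_eq_map]
  simp [List.map_map, Function.comp_def, mul_add, add_comm]

-- range(0, n, m) for 0 < n ≤ m is [0]
theorem pvRange_single (n m : Int) (hm : 0 < m) (h0 : 0 < n) (hn : n ≤ m) :
    PySem.List.pyRange 0 n m = [0] := by
  rw [PySem.List.pyRange_of_pos 0 n hm]
  simp only [if_pos (by omega : (0:Int) < n), sub_zero]
  have : (n + m - 1) / m = 1 := by
    rw [← PySem.Int.floordiv_eq_ediv_of_pos hm, PySem.Int.floordiv_eq_iff_of_pos hm]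
    constructor <;> nlinarith
  rw [this]
  simp

-- per-word equality: B's strided slicing equals A's split_word loop, for nonempty words and m ≥ 1
theorem pvChunks_eq (m : Int) (hm : 1 ≤ m) :
    ∀ (w : List Char), w ≠ [] →
      (PySem.List.pyRange 0 (w.length : Int) m).map
          (fun i => PySem.List.slice w (some i) (some (i + m))) = pvSplitLoop w m := by
  intro w
  induction w using pvSplitLoop.induct m with
  | case1 w h ih =>
    intro hw
    obtain ⟨hlong, hmpos⟩ := h
    have hd : PySem.List.slice w (some m) none = w.drop m.toNat :=
      PySem.List.slice_from w (by omega)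
    have hdne : w.drop m.toNat ≠ [] := by
      intro h
      have := congrArg List.length h
      simp only [List.length_drop, List.length_nil] at this
      omega
    rw [pvRange_shift _ m (by omega) hlong]
    rw [pvSplitLoop, dif_pos ⟨hlong, by omega⟩]
    rw [hd] at ih ⊢
    rw [← ih hdne]
    have hdlen : ((w.drop m.toNat).length : Int) = (w.length : Int) - m := by
      simp only [List.length_drop]; omega
    simp only [List.map_cons, List.map_map, zero_add, hdlen, PySem.List.slice_zero_start]
    congr 1
    refine List.map_congr_left ?_
    intro i hi
    have hi0 : 0 ≤ i := ((PySem.List.mem_pyRange_iff_of_pos (by omega) i).mp hi).1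
    simp only [Function.comp_def]
    rw [PySem.List.slice_toNat _ (by omega) (by omega),
        PySem.List.slice_toNat _ (by omega) (by omega)]
    rw [List.drop_drop]
    congr 1
    · omega
    · congr 1; omega
  | case2 w h hw =>
    intro _
    have hwpos : 0 < w.length := List.length_pos_iff.mpr hw
    rw [pvRange_single _ m (by omega) (by exact_mod_cast hwpos) (by omega)]
    rw [pvSplitLoop, dif_neg (by omega), if_pos hw]
    simp only [List.map_cons, List.map_nil, zero_add]
    rw [PySem.List.slice_zero_start, PySem.List.slice_to w (by omega)]
    rw [List.take_of_length_le (by omega)]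
  | case3 w h hw =>
    intro hne
    exact absurd hne hw

-- per-word equality lifted to A's branch structure
theorem pvWord_eq (m : Int) (hm : 1 ≤ m) (w : List Char) (hw : w ≠ []) :
    (PySem.List.pyRange 0 (w.length : Int) m).map
        (fun i => PySem.List.slice w (some i) (some (i + m))) =
      if m < (w.length : Int) then pvSplitWord w m else [w] := by
  rw [pvChunks_eq m hm w hw]
  by_cases hlong : m < (w.length : Int)
  · rw [if_pos hlong, pvSplitWord, if_pos hlong]
  · rw [if_neg hlong, pvSplitLoop, dif_neg (by omega), if_pos hw]

-- ===== VERDICT (by name: the statement is the Claim_ definition above) =====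
theorem text_to_words_spec : Claim_equal_text_to_words := by
  intro text m _ hpre
  unfold Spec_text_to_words text_to_words text_to_words_alt
  rcases hpre with hm | hnil
  · congr 1
    apply PySem.List.foldl_congr_mem
    intro acc w hwmem
    have hw := pvSplit₀_ne_nil text.toList w hwmem
    rw [pvWord_eq m hm w hw]
    split_ifs with h <;> rfl
  · have : PySem.Chars.split₀ text.toList = [] := by
      rw [← PySem.Str.split₀_map_toList, hnil]; rfl
    rw [this]
    rfl
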